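-- pv_equiv track=rewrite | github.com/nicolasblaye/adventOfCode2022 | 12-22/main.py | compute_move
-- ===== SOURCE A (Python) =====
-- def compute_next_position(row, column, facing, indexes_by_line, index_by_column):
--     if facing == 'R':
--         next_row, next_column = row, column + 1
--         if next_column > indexes_by_line[next_row][1]:
--             next_column = indexes_by_line[next_row][0]
--         return next_row, next_column
--
--     if facing == 'L':
--         next_row, next_column = row, column - 1
--         if next_column < indexes_by_line[next_row][0]:
--             next_column = indexes_by_line[next_row][1]
--         return next_row, next_column
--
--     # need y index
--     if facing == 'D':
--         next_row, next_column = row + 1, column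
--         if next_row > index_by_column[next_column][1]:
--             next_row = index_by_column[next_column][0]
--         return next_row, next_column
--
--     if facing == 'U':
--         next_row, next_column = row - 1, column
--         if next_row < index_by_column[next_column][0]:
--             next_row = index_by_column[next_column][1]
--         return next_row, next_column
--
-- def compute_move(move, facing, start_row, start_column, grid, indexes_by_line, index_by_column):
--     cur_row, cur_column = start_row, start_column
--     for i in range(move):
--         row, column = compute_next_position(cur_row, cur_column, facing, indexes_by_line, index_by_column)
--         if grid[row][column] == '.':
--             cur_row, cur_column = row, column
--         else:
--             break
--     return cur_row, cur_column
-- ===== SOURCE B (Python) =====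
-- def _walk(move, pos, mn, mx, delta, is_wall):
--     # length of the walkable segment; scan for the first wall, then jump
--     L = mx - mn + 1
--     d = None
--     for t in range(1, L + 1):
--         if is_wall(mn + (pos - mn + delta * t) % L):
--             d = t
--             break
--     steps = move if d is None else min(move, d - 1)
--     return mn + (pos - mn + delta * steps) % L
--
--
-- def compute_move(move, facing, start_row, start_column, grid, indexes_by_line, index_by_column):
--     if move <= 0:
--         return start_row, start_column
--     if facing == 'R':
--         mn, mx = indexes_by_line[start_row][0], indexes_by_line[start_row][1]
--         return start_row, _walk(move, start_column, mn, mx, 1,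
--                                 lambda c: grid[start_row][c] != '.')
--     if facing == 'L':
--         mn, mx = indexes_by_line[start_row][0], indexes_by_line[start_row][1]
--         return start_row, _walk(move, start_column, mn, mx, -1,
--                                 lambda c: grid[start_row][c] != '.')
--     if facing == 'D':
--         mn, mx = index_by_column[start_column][0], index_by_column[start_column][1]
--         return _walk(move, start_row, mn, mx, 1,
--                      lambda r: grid[r][start_column] != '.'), start_column
--     if facing == 'U':
--         mn, mx = index_by_column[start_column][0], index_by_column[start_column][1]
--         return _walk(move, start_row, mn, mx, -1,
--                      lambda r: grid[r][start_column] != '.'), start_column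
-- ===== Notes on version B (the rewrite author's own statement) =====
-- stated objective: faster
-- what changed: A simulates the walk cell by cell, re-deriving the wrap bounds on every one of `move` iterations; B scans the walkable segment once for the distance to the first wall and then jumps to the final position with a single modular-arithmetic computation, so its cost is bounded by the segment length instead of by `move`.
-- outside the precondition, e.g. on compute_move(1, 'R', 0, 2, ['###.'], {0: (0, 1)}, {}): A returns (0, 2), B returns (0, 0); on compute_move(1, 'R', 0, 0, ['.#'], {0: (0, 5)}, {}): A returns (0, 0), B returns (0, 0)
import Mathlib
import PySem

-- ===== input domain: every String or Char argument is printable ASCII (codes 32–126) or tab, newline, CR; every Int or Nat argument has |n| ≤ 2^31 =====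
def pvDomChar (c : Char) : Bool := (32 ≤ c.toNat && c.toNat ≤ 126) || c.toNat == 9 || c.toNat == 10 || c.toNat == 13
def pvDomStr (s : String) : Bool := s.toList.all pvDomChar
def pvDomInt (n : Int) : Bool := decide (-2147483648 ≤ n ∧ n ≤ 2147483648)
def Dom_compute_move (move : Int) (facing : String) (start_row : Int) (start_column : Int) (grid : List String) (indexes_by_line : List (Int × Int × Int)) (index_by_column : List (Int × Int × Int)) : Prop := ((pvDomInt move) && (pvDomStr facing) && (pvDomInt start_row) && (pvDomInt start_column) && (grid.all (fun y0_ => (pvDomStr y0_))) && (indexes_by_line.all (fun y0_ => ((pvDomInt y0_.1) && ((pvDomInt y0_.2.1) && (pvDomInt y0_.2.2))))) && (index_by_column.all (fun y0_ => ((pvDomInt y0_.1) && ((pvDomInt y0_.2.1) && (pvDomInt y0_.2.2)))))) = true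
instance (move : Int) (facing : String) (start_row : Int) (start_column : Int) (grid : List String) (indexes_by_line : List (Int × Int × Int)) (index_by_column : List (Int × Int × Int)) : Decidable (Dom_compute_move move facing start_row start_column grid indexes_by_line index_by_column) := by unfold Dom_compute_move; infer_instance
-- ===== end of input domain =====

-- B replaces A's per-step simulation loop with a single scan of the walkable segment for the
-- first wall followed by one modular-arithmetic jump (objective: faster when `move` is large).


-- ===== PORT A =====
-- `indexes_by_line` / `index_by_column` are Python dicts row/col -> (min, max): the association
-- list is looked up by KEY (first match), never by position.
-- `compute_next_position`: none = the Python raises (KeyError on the lookup, or facing not in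
-- R/L/D/U, where Python returns None and the caller's tuple unpacking raises TypeError).
def compute_next_position (row column : Int) (facing : String)
    (indexes_by_line index_by_column : List (Int × Int × Int)) : Option (Int × Int) :=
  if facing == "R" then
    match List.lookup row indexes_by_line with
    | none => none
    | some e => some (row, if column + 1 > e.2 then e.1 else column + 1)
  else if facing == "L" then
    match List.lookup row indexes_by_line with
    | none => none
    | some e => some (row, if column - 1 < e.1 then e.2 else column - 1)
  else if facing == "D" then
    match List.lookup column index_by_column with
    | none => none
    | some e => some ((if row + 1 > e.2 then e.1 else row + 1), column)
  else if facing == "U" then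
    match List.lookup column index_by_column with
    | none => none
    | some e => some ((if row - 1 < e.1 then e.2 else row - 1), column)
  else none

-- grid[row][column], none = IndexError
def pvCell (grid : List String) (r c : Int) : Option Char :=
  (PySem.List.pyGet? grid r).bind (fun s => PySem.Str.pyGet? s c)

-- the `for i in range(move): … break` loop of A (fuel = number of remaining iterations);
-- on `none` (where the Python raises) it stops — those inputs are outside Pre_.
def pvLoopA (facing : String) (grid : List String)
    (ibl ibc : List (Int × Int × Int)) : Nat → Int → Int → Int × Int
  | 0, r, c => (r, c)
  | n+1, r, c =>
    match compute_next_position r c facing ibl ibc with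
    | none => (r, c)
    | some (r', c') =>
      match pvCell grid r' c' with
      | none => (r, c)
      | some ch => if ch == '.' then pvLoopA facing grid ibl ibc n r' c' else (r, c)

def compute_move (move : Int) (facing : String) (start_row : Int) (start_column : Int) (grid : List String) (indexes_by_line : List (Int × Int × Int)) (index_by_column : List (Int × Int × Int)) : Int × Int :=
  pvLoopA facing grid indexes_by_line index_by_column move.toNat start_row start_column

-- ===== PORT B =====
-- port of Source B's `lambda c: grid[start_row][c] != '.'` (resp. rows); where Python would raise the
-- port answers true — unreachable under Pre_.
def pvCellNe (grid : List String) (r c : Int) : Bool :=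
  pvCell grid r c != some '.'

-- the `for t in range(1, L+1): … break` scan of Source B's _walk (fuel = L.toNat, t starts at 1)
def pvScan (iswall : Int → Bool) (pos mn L delta : Int) : Nat → Int → Option Int
  | 0, _ => none
  | k+1, t =>
    if iswall (mn + PySem.Int.mod (pos - mn + delta * t) L) then some t
    else pvScan iswall pos mn L delta k (t+1)

-- Source B's _walk: distance to first wall, then one modular jump
def pvWalk (move pos mn mx delta : Int) (iswall : Int → Bool) : Int :=
  let L := mx - mn + 1
  let d := pvScan iswall pos mn L delta L.toNat 1
  let steps := match d with | none => move | some t => min move (t - 1)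
  mn + PySem.Int.mod (pos - mn + delta * steps) L

def compute_move_alt (move : Int) (facing : String) (start_row : Int) (start_column : Int) (grid : List String) (indexes_by_line : List (Int × Int × Int)) (index_by_column : List (Int × Int × Int)) : Int × Int :=
  if move ≤ 0 then (start_row, start_column)
  else if facing == "R" then
    match List.lookup start_row indexes_by_line with
    | none => (start_row, start_column)  -- Python raises; outside Pre_
    | some e => (start_row, pvWalk move start_column e.1 e.2 1 (fun c => pvCellNe grid start_row c))
  else if facing == "L" then
    match List.lookup start_row indexes_by_line with
    | none => (start_row, start_column)
    | some e => (start_row, pvWalk move start_column e.1 e.2 (-1) (fun c => pvCellNe grid start_row c))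
  else if facing == "D" then
    match List.lookup start_column index_by_column with
    | none => (start_row, start_column)
    | some e => (pvWalk move start_row e.1 e.2 1 (fun r => pvCellNe grid r start_column), start_column)
  else if facing == "U" then
    match List.lookup start_column index_by_column with
    | none => (start_row, start_column)
    | some e => (pvWalk move start_row e.1 e.2 (-1) (fun r => pvCellNe grid r start_column), start_column)
  else (start_row, start_column)  -- Python B returns None here; outside Pre_

-- ===== PRECONDITION & SPEC =====
-- (mn, mx) bounds recorded for a line/column; (0, -1) when the key is absent
def pvSeg (l : List (Int × Int × Int)) (i : Int) : Int × Int :=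
  match List.lookup i l with
  | some e => e
  | none => (0, -1)

-- length of grid[r] (0 when r is out of range)
def pvLineLen (grid : List String) (r : Int) : Int :=
  match PySem.List.pyGet? grid r with
  | some s => (s.toList.length : Int)
  | none => 0

-- Pre_: either no step is taken (move ≤ 0), or the configuration is well formed for the given
-- facing: the start lies inside the recorded walkable segment of its line/column and every cell
-- of that segment exists in the grid.  This excludes inputs on which A raises, and also some
-- malformed configurations on which A happens to stop at a wall before reaching a missing cell
-- (see claim.json "cites").
def Pre_compute_move (move : Int) (facing : String) (start_row : Int) (start_column : Int) (grid : List String) (indexes_by_line : List (Int × Int × Int)) (index_by_column : List (Int × Int × Int)) : Prop :=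
  move ≤ 0 ∨
  ((facing = "R" ∨ facing = "L") ∧
    (List.lookup start_row indexes_by_line).isSome = true ∧
    0 ≤ (pvSeg indexes_by_line start_row).1 ∧
    (pvSeg indexes_by_line start_row).1 ≤ start_column ∧
    start_column ≤ (pvSeg indexes_by_line start_row).2 ∧
    (pvSeg indexes_by_line start_row).2 < pvLineLen grid start_row) ∨
  ((facing = "U" ∨ facing = "D") ∧
    (List.lookup start_column index_by_column).isSome = true ∧ 0 ≤ start_column ∧
    0 ≤ (pvSeg index_by_column start_column).1 ∧
    (pvSeg index_by_column start_column).1 ≤ start_row ∧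
    start_row ≤ (pvSeg index_by_column start_column).2 ∧
    ∀ r ∈ PySem.List.pyRange (pvSeg index_by_column start_column).1 ((pvSeg index_by_column start_column).2 + 1) 1,
      start_column < pvLineLen grid r)

instance (move : Int) (facing : String) (start_row : Int) (start_column : Int) (grid : List String) (indexes_by_line : List (Int × Int × Int)) (index_by_column : List (Int × Int × Int)) : Decidable (Pre_compute_move move facing start_row start_column grid indexes_by_line index_by_column) := by unfold Pre_compute_move; infer_instance

def pvWitness_compute_move : Int × String × Int × Int × List String × (List (Int × Int × Int)) × (List (Int × Int × Int)) :=
  (2, "R", 0, 0, ["..#"], [(0, 0, 2)], [(0, 0, 0), (1, 0, 0), (2, 0, 0)])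

def Spec_compute_move (move : Int) (facing : String) (start_row : Int) (start_column : Int) (grid : List String) (indexes_by_line : List (Int × Int × Int)) (index_by_column : List (Int × Int × Int)) (out : Int × Int) : Prop := out = compute_move_alt move facing start_row start_column grid indexes_by_line index_by_column
instance (move : Int) (facing : String) (start_row : Int) (start_column : Int) (grid : List String) (indexes_by_line : List (Int × Int × Int)) (index_by_column : List (Int × Int × Int)) (out : Int × Int) : Decidable (Spec_compute_move move facing start_row start_column grid indexes_by_line index_by_column out) := by unfold Spec_compute_move; infer_instance

-- ===== CLAIM (what is proved, stated in full; the proofs are below) =====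
def Claim_equal_compute_move : Prop := ∀ (move : Int) (facing : String) (start_row : Int) (start_column : Int) (grid : List String) (indexes_by_line : List (Int × Int × Int)) (index_by_column : List (Int × Int × Int)), Dom_compute_move move facing start_row start_column grid indexes_by_line index_by_column → Pre_compute_move move facing start_row start_column grid indexes_by_line index_by_column → Spec_compute_move move facing start_row start_column grid indexes_by_line index_by_column (compute_move move facing start_row start_column grid indexes_by_line index_by_column)

-- ===== LEMMAS AND PROOFS =====

-- abstract form of A's loop on positions of one segment: one step = +delta with wrap, stop at wall
def pvAbs (wall : Int → Bool) (mn L delta : Int) : Nat → Int → Int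
  | 0, p => p
  | n+1, p =>
    let p' := mn + PySem.Int.mod (p - mn + delta) L
    if wall p' then p else pvAbs wall mn L delta n p'

theorem pvScan_ge (w : Int → Bool) (pos mn L delta : Int) :
    ∀ (k : Nat) (t j : Int), pvScan w pos mn L delta k t = some j → t ≤ j := by
  intro k
  induction k with
  | zero => intro t j h; simp [pvScan] at h
  | succ k ih =>
    intro t j h
    simp only [pvScan] at h
    split at h
    · cases h; omega
    · have := ih (t+1) j h; omega

theorem pvMod_shift (L : Int) (hL : 0 < L) (a b : Int) :
    PySem.Int.mod (PySem.Int.mod a L + b) L = PySem.Int.mod (a + b) L := by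
  simp only [PySem.Int.mod_eq_emod_of_pos hL]
  exact Int.emod_add_emod a L b

theorem pvScan_shift (w : Int → Bool) (p mn L delta : Int) (hL : 0 < L) :
    ∀ (k : Nat) (t : Int),
      pvScan w (mn + PySem.Int.mod (p - mn + delta) L) mn L delta k t
        = Option.map (· - 1) (pvScan w p mn L delta k (t + 1)) := by
  have harg : ∀ t : Int,
      mn + PySem.Int.mod (mn + PySem.Int.mod (p - mn + delta) L - mn + delta * t) L
        = mn + PySem.Int.mod (p - mn + delta * (t + 1)) L := by
    intro t
    have h1 : mn + PySem.Int.mod (p - mn + delta) L - mn = PySem.Int.mod (p - mn + delta) L := by ring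
    rw [h1, pvMod_shift L hL]
    ring_nf
  intro k
  induction k with
  | zero => intro t; simp [pvScan]
  | succ k ih =>
    intro t
    simp only [pvScan, harg t]
    by_cases hw : w (mn + PySem.Int.mod (p - mn + delta * (t + 1)) L) = true
    · simp [hw]
    · simp only [Bool.not_eq_true] at hw
      simp [hw, ih (t + 1)]

theorem pvScan_ext (w : Int → Bool) (p mn L delta : Int) :
    ∀ (k : Nat) (t : Int),
      w (mn + PySem.Int.mod (p - mn + delta * (t + k)) L) = false →
      pvScan w p mn L delta (k + 1) t = pvScan w p mn L delta k t := by
  intro k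
  induction k with
  | zero =>
    intro t h
    simp only [Nat.cast_zero, add_zero] at h
    simp [pvScan, h]
  | succ k ih =>
    intro t h
    simp only [pvScan]
    by_cases hw : w (mn + PySem.Int.mod (p - mn + delta * t) L) = true
    · simp [hw]
    · simp only [Bool.not_eq_true] at hw
      simp only [hw, Bool.false_eq_true, if_false]
      apply ih (t + 1)
      push_cast at h ⊢
      have : t + 1 + (k : Int) = t + ((k : Int) + 1) := by ring
      rw [this]
      exact h

theorem pvWalk_eq (w : Int → Bool) (mn L delta : Int) (hL : 0 < L) :
    ∀ (n : Nat) (p : Int), 0 ≤ p - mn → p - mn < L →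
      pvAbs w mn L delta n p
        = mn + PySem.Int.mod (p - mn + delta *
            (match pvScan w p mn L delta L.toNat 1 with
             | none => (n : Int)
             | some t => min (n : Int) (t - 1))) L := by
  intro n
  induction n with
  | zero =>
    intro p h1 h2
    have hmodid : PySem.Int.mod (p - mn) L = p - mn := by
      rw [PySem.Int.mod_eq_emod_of_pos hL]; exact Int.emod_eq_of_lt h1 h2
    cases hscan : pvScan w p mn L delta L.toNat 1 with
    | none => simp [pvAbs, hmodid]
    | some t =>
      have ht := pvScan_ge w p mn L delta L.toNat 1 t hscan
      have hm0 : min ((0 : Nat) : Int) (t - 1) = 0 := by omega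
      simp only [pvAbs, hm0, mul_zero, add_zero, hmodid]
      omega
  | succ n ih =>
    intro p h1 h2
    obtain ⟨k, hk⟩ : ∃ k, L.toNat = k + 1 := ⟨L.toNat - 1, by omega⟩
    have hkL : ((k : Int) + 1) = L := by
      have := Int.toNat_of_nonneg (le_of_lt hL); omega
    have hp'1 : 0 ≤ PySem.Int.mod (p - mn + delta) L := PySem.Int.mod_nonneg _ hL
    have hp'2 : PySem.Int.mod (p - mn + delta) L < L := PySem.Int.mod_lt _ hL
    have hmodid : PySem.Int.mod (p - mn) L = p - mn := by
      rw [PySem.Int.mod_eq_emod_of_pos hL]; exact Int.emod_eq_of_lt h1 h2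
    by_cases hw : w (mn + PySem.Int.mod (p - mn + delta) L) = true
    · -- the very next cell is a wall: scan finds t = 1, no step is taken
      have hscan : pvScan w p mn L delta L.toNat 1 = some 1 := by
        rw [hk]; simp [pvScan, hw, mul_one]
      simp only [pvAbs, hw, if_true, hscan]
      have hm0 : min (((n + 1 : Nat)) : Int) (1 - 1) = 0 := by push_cast; omega
      rw [hm0, mul_zero, add_zero, hmodid]
      omega
    · -- step to p', recurse
      simp only [Bool.not_eq_true] at hw
      have hscan1 : pvScan w p mn L delta L.toNat 1 = pvScan w p mn L delta k 2 := by
        rw [hk]; simp [pvScan, hw, mul_one]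
      have hext : pvScan w p mn L delta (k + 1) 2 = pvScan w p mn L delta k 2 := by
        apply pvScan_ext
        have harg : p - mn + delta * (2 + (k : Int)) = p - mn + delta + delta * L := by
          rw [← hkL]; ring
        rw [harg, PySem.Int.mod_eq_emod_of_pos hL, Int.add_mul_emod_self_right,
          ← PySem.Int.mod_eq_emod_of_pos hL]
        exact hw
      have hshift := pvScan_shift w p mn L delta hL L.toNat 1
      rw [show (1 : Int) + 1 = 2 by norm_num] at hshift
      rw [hk, hext, ← hk] at hshift
      -- hshift : scan at p' (full fuel) = map (· - 1) (scan k 2 at p)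
      have hrec := ih (mn + PySem.Int.mod (p - mn + delta) L) (by omega) (by omega)
      simp only [pvAbs, hw, Bool.false_eq_true, if_false]
      rw [hrec, hscan1]
      have hsub : mn + PySem.Int.mod (p - mn + delta) L - mn = PySem.Int.mod (p - mn + delta) L := by ring
      cases hd : pvScan w p mn L delta k 2 with
      | none =>
        rw [hd] at hshift
        simp only [Option.map_none] at hshift
        rw [hshift]
        simp only [hsub, pvMod_shift L hL]
        congr 1
        push_cast
        ring_nf
      | some t =>
        have ht2 := pvScan_ge w p mn L delta k 2 t hd
        rw [hd] at hshift
        simp only [Option.map_some] at hshift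
        rw [hshift]
        simp only [hsub, pvMod_shift L hL]
        have hmin : delta * min ((n : Int)) (t - 1 - 1) + delta
            = delta * min (((n + 1 : Nat) : Int)) (t - 1) := by
          push_cast
          rw [show (t - 1 - 1 : Int) = t - 2 by ring]
          rw [show min ((n : Int) + 1) (t - 1) = min ((n : Int)) (t - 2) + 1 by omega]
          ring
        congr 1
        rw [← hmin]
        ring_nf

theorem pvStepFwd (mn mx c : Int) (h1 : mn ≤ c) (h2 : c ≤ mx) :
    (if c + 1 > mx then mn else c + 1) = mn + PySem.Int.mod (c - mn + 1) (mx - mn + 1) := by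
  have hL : 0 < mx - mn + 1 := by omega
  rw [PySem.Int.mod_eq_emod_of_pos hL]
  by_cases h : c + 1 > mx
  · have hc : c = mx := by omega
    subst hc
    rw [if_pos h, Int.emod_self]
    ring
  · rw [if_neg h, Int.emod_eq_of_lt (by omega) (by omega)]
    ring

theorem pvStepBwd (mn mx c : Int) (h1 : mn ≤ c) (h2 : c ≤ mx) :
    (if c - 1 < mn then mx else c - 1) = mn + PySem.Int.mod (c - mn + (-1)) (mx - mn + 1) := by
  have hL : 0 < mx - mn + 1 := by omega
  rw [PySem.Int.mod_eq_emod_of_pos hL]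
  by_cases h : c - 1 < mn
  · have hc : c = mn := by omega
    subst hc
    rw [if_pos h, show (c - c + (-1) : Int) = (mx - c + 1 - 1) + (-1) * (mx - c + 1) by ring,
      Int.add_mul_emod_self_right, Int.emod_eq_of_lt (by omega) (by omega)]
    ring
  · rw [if_neg h, Int.emod_eq_of_lt (by omega) (by omega)]
    ring

theorem pvCell_some (grid : List String) (r c : Int) (h1 : 0 ≤ c) (h2 : c < pvLineLen grid r) :
    ∃ ch, pvCell grid r c = some ch := by
  unfold pvCell pvLineLen at *
  cases hg : PySem.List.pyGet? grid r with
  | none => rw [hg] at h2; simp at h2; omega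
  | some sl =>
    rw [hg] at h2
    simp only at h2
    simp only [Option.bind_some]
    rw [show c = ((c.toNat : Nat) : Int) by omega, PySem.Str.pyGet?_natCast]
    exact ⟨_, List.getElem?_eq_getElem (by omega)⟩

theorem pvLoopA_R (grid : List String) (ibl ibc : List (Int × Int × Int)) (row : Int)
    (e : Int × Int) (hget : List.lookup row ibl = some e)
    (hmn0 : 0 ≤ e.1) (hlen : e.2 < pvLineLen grid row) :
    ∀ (n : Nat) (c : Int), e.1 ≤ c → c ≤ e.2 →
      pvLoopA "R" grid ibl ibc n row c
        = (row, pvAbs (fun x => pvCellNe grid row x) e.1 (e.2 - e.1 + 1) 1 n c) := by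
  intro n
  induction n with
  | zero => intro c h1 h2; rfl
  | succ n ih =>
    intro c h1 h2
    have hL : 0 < e.2 - e.1 + 1 := by omega
    have hstep := pvStepFwd e.1 e.2 c h1 h2
    set c' := e.1 + PySem.Int.mod (c - e.1 + 1) (e.2 - e.1 + 1) with hc'
    have hc'1 : e.1 ≤ c' := by have := PySem.Int.mod_nonneg (c - e.1 + 1) hL; omega
    have hc'2 : c' ≤ e.2 := by have := PySem.Int.mod_lt (c - e.1 + 1) hL; omega
    obtain ⟨ch, hch⟩ := pvCell_some grid row c' (by omega) (by omega)
    simp only [pvLoopA, compute_next_position, String.reduceBEq, beq_self_eq_true, if_true,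
      Bool.false_eq_true, if_false, hget, hstep, hch]
    simp only [pvAbs]
    rw [← hc']
    by_cases hdot : ch = '.'
    · subst hdot
      have hwf : pvCellNe grid row c' = false := by simp [pvCellNe, hch]
      simp only [beq_self_eq_true, if_true, hwf, Bool.false_eq_true, if_false]
      exact ih c' hc'1 hc'2
    · have hwt : pvCellNe grid row c' = true := by simp [pvCellNe, hch, bne, hdot]
      have hb : (ch == '.') = false := by simp [hdot]
      simp only [hwt, if_true, hb, Bool.false_eq_true, if_false]

theorem pvLoopA_L (grid : List String) (ibl ibc : List (Int × Int × Int)) (row : Int)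
    (e : Int × Int) (hget : List.lookup row ibl = some e)
    (hmn0 : 0 ≤ e.1) (hlen : e.2 < pvLineLen grid row) :
    ∀ (n : Nat) (c : Int), e.1 ≤ c → c ≤ e.2 →
      pvLoopA "L" grid ibl ibc n row c
        = (row, pvAbs (fun x => pvCellNe grid row x) e.1 (e.2 - e.1 + 1) (-1) n c) := by
  intro n
  induction n with
  | zero => intro c h1 h2; rfl
  | succ n ih =>
    intro c h1 h2
    have hL : 0 < e.2 - e.1 + 1 := by omega
    have hstep := pvStepBwd e.1 e.2 c h1 h2
    set c' := e.1 + PySem.Int.mod (c - e.1 + (-1)) (e.2 - e.1 + 1) with hc'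
    have hc'1 : e.1 ≤ c' := by have := PySem.Int.mod_nonneg (c - e.1 + (-1)) hL; omega
    have hc'2 : c' ≤ e.2 := by have := PySem.Int.mod_lt (c - e.1 + (-1)) hL; omega
    obtain ⟨ch, hch⟩ := pvCell_some grid row c' (by omega) (by omega)
    simp only [pvLoopA, compute_next_position, String.reduceBEq, beq_self_eq_true, if_true,
      Bool.false_eq_true, if_false, hget, hstep, hch]
    simp only [pvAbs]
    rw [← hc']
    by_cases hdot : ch = '.'
    · subst hdot
      have hwf : pvCellNe grid row c' = false := by simp [pvCellNe, hch]
      simp only [beq_self_eq_true, if_true, hwf, Bool.false_eq_true, if_false]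
      exact ih c' hc'1 hc'2
    · have hwt : pvCellNe grid row c' = true := by simp [pvCellNe, hch, bne, hdot]
      have hb : (ch == '.') = false := by simp [hdot]
      simp only [hwt, if_true, hb, Bool.false_eq_true, if_false]

theorem pvLoopA_D (grid : List String) (ibl ibc : List (Int × Int × Int)) (col : Int)
    (e : Int × Int) (hget : List.lookup col ibc = some e) (hcol0 : 0 ≤ col)
    (hlens : ∀ r ∈ PySem.List.pyRange e.1 (e.2 + 1) 1, col < pvLineLen grid r) :
    ∀ (n : Nat) (r : Int), e.1 ≤ r → r ≤ e.2 →
      pvLoopA "D" grid ibl ibc n r col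
        = (pvAbs (fun x => pvCellNe grid x col) e.1 (e.2 - e.1 + 1) 1 n r, col) := by
  intro n
  induction n with
  | zero => intro r h1 h2; rfl
  | succ n ih =>
    intro r h1 h2
    have hL : 0 < e.2 - e.1 + 1 := by omega
    have hstep := pvStepFwd e.1 e.2 r h1 h2
    set r' := e.1 + PySem.Int.mod (r - e.1 + 1) (e.2 - e.1 + 1) with hr'
    have hr'1 : e.1 ≤ r' := by have := PySem.Int.mod_nonneg (r - e.1 + 1) hL; omega
    have hr'2 : r' ≤ e.2 := by have := PySem.Int.mod_lt (r - e.1 + 1) hL; omega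
    have hlen := hlens r' (by rw [PySem.List.mem_pyRange_one]; omega)
    obtain ⟨ch, hch⟩ := pvCell_some grid r' col hcol0 hlen
    simp only [pvLoopA, compute_next_position, String.reduceBEq, beq_self_eq_true, if_true,
      Bool.false_eq_true, if_false, hget, hstep, hch]
    simp only [pvAbs]
    rw [← hr']
    by_cases hdot : ch = '.'
    · subst hdot
      have hwf : pvCellNe grid r' col = false := by simp [pvCellNe, hch]
      simp only [beq_self_eq_true, if_true, hwf, Bool.false_eq_true, if_false]
      exact ih r' hr'1 hr'2
    · have hwt : pvCellNe grid r' col = true := by simp [pvCellNe, hch, bne, hdot]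
      have hb : (ch == '.') = false := by simp [hdot]
      simp only [hwt, if_true, hb, Bool.false_eq_true, if_false]

theorem pvLoopA_U (grid : List String) (ibl ibc : List (Int × Int × Int)) (col : Int)
    (e : Int × Int) (hget : List.lookup col ibc = some e) (hcol0 : 0 ≤ col)
    (hlens : ∀ r ∈ PySem.List.pyRange e.1 (e.2 + 1) 1, col < pvLineLen grid r) :
    ∀ (n : Nat) (r : Int), e.1 ≤ r → r ≤ e.2 →
      pvLoopA "U" grid ibl ibc n r col
        = (pvAbs (fun x => pvCellNe grid x col) e.1 (e.2 - e.1 + 1) (-1) n r, col) := by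
  intro n
  induction n with
  | zero => intro r h1 h2; rfl
  | succ n ih =>
    intro r h1 h2
    have hL : 0 < e.2 - e.1 + 1 := by omega
    have hstep := pvStepBwd e.1 e.2 r h1 h2
    set r' := e.1 + PySem.Int.mod (r - e.1 + (-1)) (e.2 - e.1 + 1) with hr'
    have hr'1 : e.1 ≤ r' := by have := PySem.Int.mod_nonneg (r - e.1 + (-1)) hL; omega
    have hr'2 : r' ≤ e.2 := by have := PySem.Int.mod_lt (r - e.1 + (-1)) hL; omega
    have hlen := hlens r' (by rw [PySem.List.mem_pyRange_one]; omega)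
    obtain ⟨ch, hch⟩ := pvCell_some grid r' col hcol0 hlen
    simp only [pvLoopA, compute_next_position, String.reduceBEq, beq_self_eq_true, if_true,
      Bool.false_eq_true, if_false, hget, hstep, hch]
    simp only [pvAbs]
    rw [← hr']
    by_cases hdot : ch = '.'
    · subst hdot
      have hwf : pvCellNe grid r' col = false := by simp [pvCellNe, hch]
      simp only [beq_self_eq_true, if_true, hwf, Bool.false_eq_true, if_false]
      exact ih r' hr'1 hr'2
    · have hwt : pvCellNe grid r' col = true := by simp [pvCellNe, hch, bne, hdot]
      have hb : (ch == '.') = false := by simp [hdot]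
      simp only [hwt, if_true, hb, Bool.false_eq_true, if_false]

-- ===== VERDICT (by name: the statement is the Claim_ definition above) =====
theorem compute_move_spec : Claim_equal_compute_move := by
  intro move facing start_row start_column grid ibl ibc hdom hpre
  unfold Spec_compute_move
  by_cases hm : move ≤ 0
  · have h0 : move.toNat = 0 := by omega
    simp [compute_move, compute_move_alt, hm, h0, pvLoopA]
  · have hcast : ((move.toNat : Nat) : Int) = move := by omega
    rcases hpre with hm' | ⟨hf, h1, h3, h4, h5, h6⟩ | ⟨hf, h1, hcol0, h3, h4, h5, h7⟩
    · omega
    · -- facing 'R' or 'L'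
      obtain ⟨e, hget⟩ : ∃ e, List.lookup start_row ibl = some e :=
        Option.isSome_iff_exists.mp h1
      simp only [pvSeg, hget] at h3 h4 h5 h6
      have hL : 0 < e.2 - e.1 + 1 := by omega
      rcases hf with rfl | rfl
      · rw [compute_move,
          pvLoopA_R grid ibl ibc start_row e hget h3 h6 move.toNat start_column h4 h5]
        simp only [compute_move_alt, if_neg hm, beq_self_eq_true, if_true, hget]
        simp only [pvWalk]
        rw [pvWalk_eq (fun x => pvCellNe grid start_row x) e.1 (e.2 - e.1 + 1) 1 hL
          move.toNat start_column (by omega) (by omega), hcast]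
      · rw [compute_move,
          pvLoopA_L grid ibl ibc start_row e hget h3 h6 move.toNat start_column h4 h5]
        simp only [compute_move_alt, if_neg hm, String.reduceBEq, Bool.false_eq_true, if_false,
          beq_self_eq_true, if_true, hget]
        simp only [pvWalk]
        rw [pvWalk_eq (fun x => pvCellNe grid start_row x) e.1 (e.2 - e.1 + 1) (-1) hL
          move.toNat start_column (by omega) (by omega), hcast]
    · -- facing 'U' or 'D'
      obtain ⟨e, hget⟩ : ∃ e, List.lookup start_column ibc = some e :=
        Option.isSome_iff_exists.mp h1
      simp only [pvSeg, hget] at h3 h4 h5 h7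
      have hL : 0 < e.2 - e.1 + 1 := by omega
      rcases hf with rfl | rfl
      · rw [compute_move,
          pvLoopA_U grid ibl ibc start_column e hget hcol0 h7 move.toNat start_row h4 h5]
        simp only [compute_move_alt, if_neg hm, String.reduceBEq, Bool.false_eq_true, if_false,
          beq_self_eq_true, if_true, hget]
        simp only [pvWalk]
        rw [pvWalk_eq (fun x => pvCellNe grid x start_column) e.1 (e.2 - e.1 + 1) (-1) hL
          move.toNat start_row (by omega) (by omega), hcast]
      · rw [compute_move,
          pvLoopA_D grid ibl ibc start_column e hget hcol0 h7 move.toNat start_row h4 h5]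
        simp only [compute_move_alt, if_neg hm, String.reduceBEq, Bool.false_eq_true, if_false,
          beq_self_eq_true, if_true, hget]
        simp only [pvWalk]
        rw [pvWalk_eq (fun x => pvCellNe grid x start_column) e.1 (e.2 - e.1 + 1) 1 hL
          move.toNat start_row (by omega) (by omega), hcast]
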